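-- pv_equiv track=rewrite | github.com/VictorAzevedoM/challenges | soma_multiplica.py | soma_multiplica
-- ===== SOURCE A (Python) =====
-- def soma_multiplica(lista):
--     soma = 0
--     maior_impar = 0
--     for i in lista:
--         if i % 2 == 0:
--             soma += i
--         else:
--             if i > maior_impar:
--                 maior_impar = i
--     return soma * maior_impar
-- ===== SOURCE B (Python) =====
-- def soma_multiplica(lista):
--     impares = sorted(i for i in lista if i % 2 != 0)
--     maior = impares[-1] if impares and impares[-1] > 0 else 0
--     return (sum(lista) - sum(impares)) * maior
-- ===== Notes on version B (the rewrite author's own statement) =====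
-- stated objective: alternative
-- what changed: Instead of a fused scan, B sorts the odd elements once and reads the maximum odd off the sorted list's last slot (floored at 0), and obtains the even-sum by subtraction: sum(lista) - sum(odds).
import Mathlib
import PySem

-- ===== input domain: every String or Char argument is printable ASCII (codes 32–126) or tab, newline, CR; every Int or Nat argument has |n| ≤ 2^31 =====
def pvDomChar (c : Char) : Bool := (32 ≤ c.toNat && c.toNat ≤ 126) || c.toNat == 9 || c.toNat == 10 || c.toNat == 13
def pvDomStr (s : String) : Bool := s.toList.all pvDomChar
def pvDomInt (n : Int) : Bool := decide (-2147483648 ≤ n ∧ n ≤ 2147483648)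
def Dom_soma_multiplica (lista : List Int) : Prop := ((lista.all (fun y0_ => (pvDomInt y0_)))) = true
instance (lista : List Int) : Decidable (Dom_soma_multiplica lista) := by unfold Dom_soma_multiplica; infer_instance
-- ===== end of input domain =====

-- B sorts the odd elements and reads the maximum odd off the sorted list's last slot (floored at 0), computing the even-sum as sum(lista) - sum(odds), instead of A's fused accumulator loop: an alternative sort-based decomposition.


-- ===== PORT A =====
-- one fused loop carrying (soma, maior_impar)
def soma_multiplica (lista : List Int) : Int :=
  let st := lista.foldl (fun (st : Int × Int) i =>
    if PySem.Int.mod i 2 == 0 then (st.1 + i, st.2)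
    else if i > st.2 then (st.1, i) else st) (0, 0)
  st.1 * st.2

-- ===== PORT B =====
-- sort the odds; max odd = last slot of the sorted list (floored at 0); even-sum = sum(lista) - sum(odds)
def soma_multiplica_alt (lista : List Int) : Int :=
  let impares := PySem.List.sorted (lista.filter (fun i => !(PySem.Int.mod i 2 == 0))) (fun x => x) false
  let maior := match PySem.List.pyGet? impares (-1) with
    | some v => if v > 0 then v else 0
    | none => 0
  (lista.sum - impares.sum) * maior

-- ===== PRECONDITION & SPEC =====
def Spec_soma_multiplica (lista : List Int) (out : Int) : Prop := out = soma_multiplica_alt lista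
instance (lista : List Int) (out : Int) : Decidable (Spec_soma_multiplica lista out) := by unfold Spec_soma_multiplica; infer_instance

-- ===== CLAIM (what is proved, stated in full; the proofs are below) =====
def Claim_equal_soma_multiplica : Prop := ∀ (lista : List Int), Dom_soma_multiplica lista → Spec_soma_multiplica lista (soma_multiplica lista)

-- ===== LEMMAS AND PROOFS =====

-- A's loop, started from any state (s, m), adds the even-sum to s and runs max over the odds from m.
theorem soma_multiplica_foldl (lista : List Int) (s m : Int) :
    lista.foldl (fun (st : Int × Int) i =>
      if PySem.Int.mod i 2 == 0 then (st.1 + i, st.2)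
      else if i > st.2 then (st.1, i) else st) (s, m)
    = (s + (lista.filter (fun i => PySem.Int.mod i 2 == 0)).sum,
       (lista.filter (fun i => !(PySem.Int.mod i 2 == 0))).foldl max m) := by
  induction lista generalizing s m with
  | nil => simp
  | cons x t ih =>
    simp only [List.foldl_cons, List.filter_cons]
    by_cases hx : PySem.Int.mod x 2 == 0
    · rw [if_pos hx, ih]
      have hd : (2:Int) ∣ x := (PySem.Int.mod_eq_zero_iff_dvd x 2).mp (by simpa using hx)
      have h1 : ¬ x % 2 = 1 := by omega
      simp [hd, add_assoc]
    · rw [if_neg hx]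
      have hd : ¬ (2:Int) ∣ x := fun h => hx (by simpa using (PySem.Int.mod_eq_zero_iff_dvd x 2).mpr h)
      have h1 : x % 2 = 1 := by omega
      by_cases hm : x > m
      · rw [if_pos hm, ih]
        simp [h1, max_eq_right (le_of_lt hm)]
      · rw [if_neg hm, ih]
        simp [h1, max_eq_left (le_of_not_gt hm)]

-- filter partition of the sum: evens-sum = total − odds-sum
theorem sum_filter_even (lista : List Int) (p : Int → Bool) :
    (lista.filter p).sum = lista.sum - (lista.filter (fun i => !(p i))).sum := by
  have hperm := List.filter_append_perm p lista
  have := hperm.sum_eq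
  rw [List.sum_append] at this
  omega

-- foldl max over a nondecreasing list reads the last element
theorem foldl_max_pairwise (s : List Int) (c : Int)
    (hp : s.Pairwise (fun a b => a ≤ b)) :
    s.foldl max c = max c (s.getLast?.getD c) := by
  induction s generalizing c with
  | nil => simp
  | cons x t ih =>
    rcases List.pairwise_cons.mp hp with ⟨hx, ht⟩
    cases t with
    | nil => simp
    | cons y u =>
      rw [List.foldl_cons, ih (max c x) ht]
      have hlast : (y :: u).getLast? = some ((y :: u).getLast (by simp)) := List.getLast?_eq_some_getLast (by simp)
      have hxle : x ≤ (y :: u).getLast (by simp) := hx _ (List.getLast_mem _)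
      simp only [List.getLast?_cons_cons, hlast, Option.getD_some]
      rw [max_assoc]
      congr 1
      exact max_eq_right hxle

-- foldl max is permutation-invariant (max is left-commutative)
theorem foldl_max_perm (l1 l2 : List Int) (h : l1.Perm l2) (c : Int) :
    l1.foldl max c = l2.foldl max c := by
  exact List.Perm.foldl_eq (rcomm := ⟨fun b a1 a2 => max_right_comm b a1 a2⟩) h c

-- ===== VERDICT (by name: the statement is the Claim_ definition above) =====
theorem soma_multiplica_spec : Claim_equal_soma_multiplica := by
  intro lista _
  unfold Spec_soma_multiplica soma_multiplica soma_multiplica_alt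
  rw [soma_multiplica_foldl]
  simp only [PySem.List.pyGet?_neg_one]
  set odds := lista.filter (fun i => !(PySem.Int.mod i 2 == 0)) with hodds
  have hperm : (PySem.List.sorted odds (fun x => x) false).Perm odds := PySem.List.sorted_perm ..
  have hsum : (PySem.List.sorted odds (fun x => x) false).sum = odds.sum := hperm.sum_eq
  have hmax : odds.foldl max 0
      = max 0 ((PySem.List.sorted odds (fun x => x) false).getLast?.getD 0) := by
    rw [foldl_max_perm odds (PySem.List.sorted odds (fun x => x) false) hperm.symm 0]
    exact foldl_max_pairwise _ 0 (by simpa using PySem.List.sorted_pairwise odds (fun x => x))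
  rw [sum_filter_even lista (fun i => PySem.Int.mod i 2 == 0), hsum, hmax]
  cases h : (PySem.List.sorted odds (fun x => x) false).getLast? with
  | none => simp
  | some v =>
    simp only [Option.getD_some]
    by_cases hv : v > 0
    · rw [max_eq_right (le_of_lt hv), if_pos hv, zero_add]
    · rw [max_eq_left (not_lt.mp hv), if_neg hv, zero_add]
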